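-- pv_equiv track=rewrite | github.com/Birkagal/AoC-2020 | src/20.py | build_image
-- ===== SOURCE A (Python) =====
-- def get_edge(tile, side):
--     if side == 'u':
--         return tile[0]
--     if side == 'd':
--         return tile[-1]
--
--     line = ''
--     if side == 'l':
--         for row in tile:
--             line += row[0]
--     elif side == 'r':
--         for row in tile:
--             line += row[-1]
--     return line
--
-- def rotate_90_clockwise(tile):
--     new_tile = []
--     for char in range(len(tile[0])):
--         new_row = ''
--         for row in tile[::-1]:
--             new_row += row[char]
--         new_tile.append(new_row)
--     return new_tile
--
-- def orientations(tile):
--     yield tile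
--     for _ in range(3):
--         tile = rotate_90_clockwise(tile)
--         yield tile
--
-- def arrangements(tile):
--     yield from orientations(tile)
--     yield from orientations(tile[::-1])
--
-- def matching_tile(tile, tiles, side_a, side_b):
--     prev_side = get_edge(tile, side_a)
--
--     # Iterate over all possible tiles
--     for other_id, other in tiles.items():
--         if tile is other:
--             continue
--
--         # Arrange second tile in any possible way
--         for other in arrangements(other):
--             # Until the two sides match
--             if prev_side == get_edge(other, side_b):
--                 tiles.pop(other_id)
--                 return other
--
-- def matching_row(prev, tiles, tiles_per_row):
--     yield prev
--     for _ in range(tiles_per_row - 1):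
--         tile = matching_tile(prev, tiles, 'e', 'w')
--         prev = tile
--         yield prev
--
-- def strip_edges(matrix):
--     return [row[1:-1] for row in matrix[1:-1]]
--
-- def build_image(top_left_tile, tiles, image_dimension):
--     # Start from the top left
--     first = top_left_tile
--     image = []
--
--     while 1:
--         # Get a row of matching tiles
--         image_row = matching_row(first, tiles, image_dimension)
--         # Strip the outermost edges from each of them
--         image_row = map(strip_edges, image_row)
--         # Add together each row of the tiles into a single big row, and add it to the final image
--         image.extend(map(''.join, zip(*image_row)))
--
--         # Do this until tiles run out
--         if not tiles:
--             break
--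
--         # Match the first tile of the next row, which is south of the first tile of the current row
--         first = matching_tile(first, tiles, 's', 'n')
--
--     return image
-- ===== SOURCE B (Python) =====
-- # B: matching in A is vacuous for the sides it uses ('e','w','s','n' are not handled by
-- # get_edge, so every edge compares as '' and matching_tile just pops the first remaining
-- # tile): consume the dict's values in insertion order by index arithmetic, no edge
-- # machinery.  A empties the tiles dict as a side effect; B reproduces that with clear().
-- def strip_edges(matrix):
--     return [row[1:-1] for row in matrix[1:-1]]
--
-- def build_image(top_left_tile, tiles, image_dimension):
--     k = max(image_dimension - 1, 0)
--     seq = list(tiles.values())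
--     tiles.clear()
--     image = []
--     i = 0
--     first = top_left_tile
--     while True:
--         row = [first] + seq[i:i + k]
--         i += k
--         stripped = [strip_edges(t) for t in row]
--         image += [''.join(parts) for parts in zip(*stripped)]
--         if i >= len(seq):
--             break
--         first = seq[i]
--         i += 1
--     return image
-- ===== Notes on version B (the rewrite author's own statement) =====
-- stated objective: simpler
-- what changed: A's edge-matching machinery is vacuous for the sides it uses ('e','w','s','n' fall through get_edge and compare as ''), so every matching_tile call just pops the first remaining dict entry; B drops the generators/arrangements/dict-popping entirely and assembles the image by chunking the dict's values list with index arithmetic (one slice per row plus one skipped tile), stitching each row with a zip/join comprehension.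
import Mathlib
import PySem

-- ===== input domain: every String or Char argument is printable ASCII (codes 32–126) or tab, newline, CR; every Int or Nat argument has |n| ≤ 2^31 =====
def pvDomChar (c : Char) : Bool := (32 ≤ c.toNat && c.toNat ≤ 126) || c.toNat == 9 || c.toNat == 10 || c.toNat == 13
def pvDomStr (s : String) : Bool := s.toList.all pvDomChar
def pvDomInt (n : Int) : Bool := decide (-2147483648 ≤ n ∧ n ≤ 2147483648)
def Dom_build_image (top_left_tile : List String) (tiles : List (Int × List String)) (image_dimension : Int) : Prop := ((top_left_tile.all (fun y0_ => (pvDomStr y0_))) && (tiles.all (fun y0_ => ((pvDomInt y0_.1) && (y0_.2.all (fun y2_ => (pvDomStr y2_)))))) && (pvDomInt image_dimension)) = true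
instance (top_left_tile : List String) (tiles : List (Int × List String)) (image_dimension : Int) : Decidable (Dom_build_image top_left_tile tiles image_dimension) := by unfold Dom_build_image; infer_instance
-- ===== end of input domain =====

-- B replaces A's (vacuous, for the sides A uses) edge-matching machinery by direct index
-- arithmetic over the dict's values; equivalence is about the RETURN value (A empties the
-- tiles dict in place; the Python B reproduces that with tiles.clear()).

-- ===== PORT A =====
-- zip(*xss): tuples while every list is nonempty; zip() with no arguments is empty.
-- Shared Python-builtin helper (both Source A and Source B call zip(*...)).
def pvZipGo (fuel : Nat) (xss : List (List String)) : List (List String) :=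
  match fuel with
  | 0 => []
  | fuel + 1 =>
    match xss.mapM List.head? with
    | none => []
    | some hs => hs :: pvZipGo fuel (xss.map List.tail)

def pvZipCols (xss : List (List String)) : List (List String) :=
  match xss with
  | [] => []
  | x :: _ => pvZipGo x.length xss   -- zip stops at the shortest list, ≤ the first's length

-- get_edge(tile, side); 'line += row[0]' / 'row[-1]' can raise IndexError → none
def pvGetEdge (tile : List String) (side : String) : Option String :=
  if side = "u" then PySem.List.pyGet? tile 0
  else if side = "d" then PySem.List.pyGet? tile (-1)
  else if side = "l" then
    (tile.foldlM (fun line row => (PySem.Str.pyGet? row 0).map (fun c => line ++ [c])) ([] : List Char)).map String.ofList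
  else if side = "r" then
    (tile.foldlM (fun line row => (PySem.Str.pyGet? row (-1)).map (fun c => line ++ [c])) ([] : List Char)).map String.ofList
  else some ""   -- unknown side: the initial line = '' is returned

-- rotate_90_clockwise; none where Python raises IndexError (tile[0] or row[char])
def pvRotate90 (tile : List String) : Option (List String) :=
  match PySem.List.pyGet? tile 0 with
  | none => none
  | some r0 =>
    (List.range (PySem.Str.len r0).toNat).mapM (fun c =>
      (tile.reverse.foldlM (fun nr row => (PySem.Str.pyGet? row (c : Int)).map (fun ch => nr ++ [ch]))
        ([] : List Char)).map String.ofList)   -- tile[::-1] is tile.reverse (PySem.List.slice?_none_none_neg_one)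

-- the lazy 'for other in arrangements(other)' search: check the current orientation, only
-- on failure compute the next rotation (fuel 4 = orientations(); generators are lazy, so a
-- rotation is computed only when the previous orientation did not match)
def pvArrSearch (prevSide sideB : String) (cur : List String) : Nat → Option (List String)
  | 0 => none
  | fuel + 1 =>
    if pvGetEdge cur sideB = some prevSide then some cur
    else
      match pvRotate90 cur with
      | none => none   -- Python raises inside rotate_90_clockwise here
      | some nxt => pvArrSearch prevSide sideB nxt fuel

-- arrangements(tile) = orientations(tile) then orientations(tile[::-1])
def pvMatchArrangement (prevSide sideB : String) (other : List String) : Option (List String) :=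
  match pvArrSearch prevSide sideB other 4 with
  | some m => some m
  | none => pvArrSearch prevSide sideB other.reverse 4

-- the 'for other_id, other in tiles.items()' scan; returns the matched (reoriented) tile
-- and the dict with that key popped.  'if tile is other' is CPython OBJECT identity: the
-- argument objects are distinct, so the branch never fires and is not ported.
def pvScan (prevSide sideB : String) (seen : List (Int × List String)) :
    List (Int × List String) → Option (List String × List (Int × List String))
  | [] => none   -- Python falls off the loop and returns None
  | (oid, other) :: rest =>
    match pvMatchArrangement prevSide sideB other with
    | some m => some (m, seen.reverse ++ rest)   -- tiles.pop(other_id)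
    | none => pvScan prevSide sideB ((oid, other) :: seen) rest

def pvMatchingTile (tile : List String) (tiles : List (Int × List String)) (sideA sideB : String) :
    Option (List String × List (Int × List String)) :=
  match pvGetEdge tile sideA with
  | none => none
  | some prevSide => pvScan prevSide sideB [] tiles

-- matching_row: yields prev, then tiles_per_row - 1 matched tiles; none = a matching_tile
-- returned None (strip_edges would then raise TypeError)
def pvRowGo (count : Nat) (prev : List String) (tiles : List (Int × List String))
    (acc : List (List String)) : Option (List (List String) × List (Int × List String)) :=
  match count with
  | 0 => some (acc, tiles)
  | c + 1 =>
    match pvMatchingTile prev tiles "e" "w" with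
    | none => none
    | some (t, tiles') => pvRowGo c t tiles' (acc ++ [t])

def pvMatchingRow (prev : List String) (tiles : List (Int × List String)) (tpr : Int) :
    Option (List (List String) × List (Int × List String)) :=
  pvRowGo (tpr - 1).toNat prev tiles [prev]   -- range(tpr - 1): empty for tpr ≤ 1

-- strip_edges
def pvStrip (m : List String) : List String :=
  (PySem.List.slice m (some 1) (some (-1))).map (fun row => PySem.Str.slice row (some 1) (some (-1)))

-- the 'while 1' loop; fuel = len(tiles) + 1 bounds the iteration count (each continuing
-- iteration pops at least one tile); on fuel 0 / a None from matching (Python would raise,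
-- outside Pre_) the image so far is returned
def pvBuildLoop (dim : Int) : Nat → List String → List (Int × List String) → List String → List String
  | 0, _, _, image => image
  | fuel + 1, first, tiles, image =>
    match pvMatchingRow first tiles dim with
    | none => image
    | some (row, tiles') =>
      let image := image ++ (pvZipCols (row.map pvStrip)).map (PySem.Str.join "")
      if tiles' = [] then image
      else
        match pvMatchingTile first tiles' "s" "n" with
        | none => image
        | some (f', tiles'') => pvBuildLoop dim fuel f' tiles'' image

def build_image (top_left_tile : List String) (tiles : List (Int × List String)) (image_dimension : Int) : List String :=
  -- the Python parameter is a dict: normalize the association list as dict(pairs) does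
  let items := (PySem.Dict.ofList tiles).items
  pvBuildLoop image_dimension (items.length + 1) top_left_tile items []

-- ===== PORT B =====
def pvStripB (m : List String) : List String :=
  (PySem.List.slice m (some 1) (some (-1))).map (fun row => PySem.Str.slice row (some 1) (some (-1)))

def pvAltLoop (seq : List (List String)) (k : Int) :
    Nat → Int → List String → List String → List String
  | 0, _, _, image => image
  | fuel + 1, i, first, image =>
    let row := first :: PySem.List.slice seq (some i) (some (i + k))
    let i := i + k
    let stripped := row.map pvStripB
    let image := image ++ (pvZipCols stripped).map (PySem.Str.join "")
    if (seq.length : Int) ≤ i then image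
    else
      match PySem.List.pyGet? seq i with
      | none => image   -- unreachable: 0 ≤ i < len(seq) here
      | some f' => pvAltLoop seq k fuel (i + 1) f' image

def build_image_alt (top_left_tile : List String) (tiles : List (Int × List String)) (image_dimension : Int) : List String :=
  let k := max (image_dimension - 1) 0
  let seq := (PySem.Dict.ofList tiles).values   -- list(tiles.values())
  pvAltLoop seq k (seq.length + 1) 0 top_left_tile []

-- ===== PRECONDITION & SPEC =====
-- Pre_ excludes exactly the inputs on which A raises TypeError: with image_dimension ≥ 2,
-- matching_row needs the number of (distinct-key) tiles to be ≡ -1 mod image_dimension,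
-- otherwise matching_tile returns None and strip_edges(None) raises.
def Pre_build_image (top_left_tile : List String) (tiles : List (Int × List String)) (image_dimension : Int) : Prop :=
  image_dimension ≤ 1 ∨ (((PySem.Dict.ofList tiles).size : Int) + 1) % image_dimension = 0
instance (top_left_tile : List String) (tiles : List (Int × List String)) (image_dimension : Int) : Decidable (Pre_build_image top_left_tile tiles image_dimension) := by unfold Pre_build_image; infer_instance

def pvWitness_build_image : List String × (List (Int × List String)) × Int :=
  (["abcd", "efgh", "ijkl", "mnop"], [(1, ["qrst", "uvwx", "yzAB", "CDEF"])], 2)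

def Spec_build_image (top_left_tile : List String) (tiles : List (Int × List String)) (image_dimension : Int) (out : List String) : Prop := out = build_image_alt top_left_tile tiles image_dimension
instance (top_left_tile : List String) (tiles : List (Int × List String)) (image_dimension : Int) (out : List String) : Decidable (Spec_build_image top_left_tile tiles image_dimension out) := by unfold Spec_build_image; infer_instance

-- ===== CLAIM (what is proved, stated in full; the proofs are below) =====
def Claim_equal_build_image : Prop := ∀ (top_left_tile : List String) (tiles : List (Int × List String)) (image_dimension : Int), Dom_build_image top_left_tile tiles image_dimension → Pre_build_image top_left_tile tiles image_dimension → Spec_build_image top_left_tile tiles image_dimension (build_image top_left_tile tiles image_dimension)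


-- ===== LEMMAS AND PROOFS =====

theorem pv_edge_e (t : List String) : pvGetEdge t "e" = some "" := by
  simp [pvGetEdge]

theorem pv_edge_w (t : List String) : pvGetEdge t "w" = some "" := by
  simp [pvGetEdge]

theorem pv_edge_s (t : List String) : pvGetEdge t "s" = some "" := by
  simp [pvGetEdge]

theorem pv_edge_n (t : List String) : pvGetEdge t "n" = some "" := by
  simp [pvGetEdge]

-- the first orientation always matches when side_b compares as ''
theorem pv_arr_trivial (sideB : String) (o : List String) (h : pvGetEdge o sideB = some "") :
    pvMatchArrangement "" sideB o = some o := by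
  simp [pvMatchArrangement, pvArrSearch, h]

theorem pv_matching_tile_ew (t : List String) (tiles : List (Int × List String)) :
    pvMatchingTile t tiles "e" "w" =
      (match tiles with
       | [] => none
       | (_, o) :: rest => some (o, rest)) := by
  cases tiles with
  | nil => simp [pvMatchingTile, pv_edge_e, pvScan]
  | cons p rest =>
    obtain ⟨oid, o⟩ := p
    simp [pvMatchingTile, pv_edge_e, pvScan, pv_arr_trivial "w" o (pv_edge_w o)]

theorem pv_matching_tile_sn (t : List String) (tiles : List (Int × List String)) :
    pvMatchingTile t tiles "s" "n" =
      (match tiles with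
       | [] => none
       | (_, o) :: rest => some (o, rest)) := by
  cases tiles with
  | nil => simp [pvMatchingTile, pv_edge_s, pvScan]
  | cons p rest =>
    obtain ⟨oid, o⟩ := p
    simp [pvMatchingTile, pv_edge_s, pvScan, pv_arr_trivial "n" o (pv_edge_n o)]

-- matching_row with the vacuous 'e'/'w' match takes the first c tiles of the dict
theorem pv_rowGo_eq (c : Nat) : ∀ (prev : List String) (tiles : List (Int × List String))
    (acc : List (List String)),
    pvRowGo c prev tiles acc =
      if c ≤ tiles.length then some (acc ++ (tiles.take c).map Prod.snd, tiles.drop c)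
      else none := by
  induction c with
  | zero => intro prev tiles acc; simp [pvRowGo]
  | succ c ih =>
    intro prev tiles acc
    cases tiles with
    | nil => simp [pvRowGo, pv_matching_tile_ew]
    | cons p rest =>
      obtain ⟨oid, o⟩ := p
      simp only [pvRowGo, pv_matching_tile_ew, ih o rest (acc ++ [o]), List.length_cons,
        List.take_succ_cons, List.drop_succ_cons, List.map_cons]
      split_ifs with h h' h' <;> try omega
      · simp
      · rfl

theorem pvStripB_eq : pvStripB = pvStrip := rfl

-- the two loops agree in lockstep: A consumes the remaining items list, B walks the full
-- values list by index; the Pre_-derived invariant guarantees every row is complete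
theorem pv_loop_eq (seq : List (List String)) (dim : Int) :
    ∀ (fuel : Nat) (i : Nat) (rem : List (Int × List String)) (first : List String)
      (image : List String),
      rem.map Prod.snd = seq.drop i → i ≤ seq.length →
      (dim ≤ 1 ∨ ((seq.length : Int) + 1 - i) % dim = 0) →
      pvBuildLoop dim fuel first rem image =
        pvAltLoop seq (max (dim - 1) 0) fuel (i : Int) first image := by
  intro fuel
  induction fuel with
  | zero => intro i rem first image _ _ _; simp [pvBuildLoop, pvAltLoop]
  | succ fuel ih =>
    intro i rem first image hmap hi hinv
    have hlen : rem.length = seq.length - i := by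
      have h := congrArg List.length hmap; simpa using h
    set c := (dim - 1).toNat with hc_def
    have hk : max (dim - 1) 0 = (c : Int) := by omega
    rw [hk]
    have hc : c ≤ rem.length := by
      by_cases hd2 : 2 ≤ dim
      · have h0 := hinv.resolve_left (by omega)
        have hdvd := Int.dvd_of_emod_eq_zero h0
        have hpos : (0 : Int) < (seq.length : Int) + 1 - i := by
          have : (i : Int) ≤ (seq.length : Int) := by exact_mod_cast hi
          omega
        have hle := Int.le_of_dvd hpos hdvd
        omega
      · omega
    have hrow : pvMatchingRow first rem dim =
        some (first :: (rem.take c).map Prod.snd, rem.drop c) := by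
      rw [pvMatchingRow, ← hc_def, pv_rowGo_eq, if_pos hc, List.singleton_append]
    have hslice : PySem.List.slice seq (some (i : Int)) (some ((i : Int) + (c : Int))) =
        (seq.drop i).take c :=
      PySem.List.slice_natCast_add seq i c
    have htake : (rem.take c).map Prod.snd = (seq.drop i).take c := by
      rw [List.map_take, hmap]
    by_cases hend : seq.length ≤ i + c
    · have hA : rem.drop c = [] := by rw [List.drop_eq_nil_iff]; omega
      have hB : (seq.length : Int) ≤ (i : Int) + (c : Int) := by exact_mod_cast hend
      simp [pvBuildLoop, pvAltLoop, hrow, hslice, htake, pvStripB_eq, hA, hB]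
    · have hlt : i + c < seq.length := by omega
      have hA : rem.drop c ≠ [] := by
        rw [ne_eq, List.drop_eq_nil_iff]; omega
      have hmap2 : (rem.drop c).map Prod.snd = seq.drop (i + c) := by
        rw [List.map_drop, hmap, List.drop_drop, Nat.add_comm]
      have hgetc : seq.drop (i + c) = seq[i + c] :: seq.drop (i + c + 1) :=
        List.drop_eq_getElem_cons hlt
      rcases hr : rem.drop c with _ | ⟨p, r⟩
      · exact absurd hr hA
      · rw [hr, hgetc, List.map_cons, List.cons.injEq] at hmap2
        obtain ⟨hp2, hrmap⟩ := hmap2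
        have hB : ¬ ((seq.length : Int) ≤ (i : Int) + (c : Int)) := by
          intro h
          have : seq.length ≤ i + c := by exact_mod_cast h
          omega
        have hget : PySem.List.pyGet? seq ((i : Int) + (c : Int)) = some seq[i + c] := by
          have hcast : (i : Int) + (c : Int) = ((i + c : Nat) : Int) := by push_cast; ring
          rw [hcast, PySem.List.pyGet?_natCast, List.getElem?_eq_getElem hlt]
        have hinv' : dim ≤ 1 ∨ ((seq.length : Int) + 1 - (i + c + 1 : Nat)) % dim = 0 := by
          by_cases hd2 : 2 ≤ dim
          · right
            have h0 := hinv.resolve_left (by omega)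
            have hdvd := Int.dvd_of_emod_eq_zero h0
            have hdvd' : dim ∣ ((seq.length : Int) + 1 - (i + c + 1 : Nat)) := by
              have heq : ((seq.length : Int) + 1 - (i + c + 1 : Nat)) =
                  ((seq.length : Int) + 1 - i) - dim := by push_cast; omega
              rw [heq]
              exact dvd_sub hdvd dvd_rfl
            exact Int.emod_eq_zero_of_dvd hdvd'
          · left; omega
        have hrec := ih (i + c + 1) r seq[i + c]
          (image ++ (pvZipCols ((first :: (rem.take c).map Prod.snd).map pvStrip)).map (PySem.Str.join ""))
          hrmap (by omega) hinv'
        rw [hk] at hrec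
        push_cast at hrec
        simp only [pvBuildLoop, pvAltLoop, hrow, hslice, htake, pvStripB_eq, hr,
          pv_matching_tile_sn, if_neg hB, hget, hp2]
        rw [htake] at hrec
        exact hrec

theorem build_image_eq (top_left_tile : List String) (tiles : List (Int × List String))
    (image_dimension : Int) (h : Pre_build_image top_left_tile tiles image_dimension) :
    build_image top_left_tile tiles image_dimension =
      build_image_alt top_left_tile tiles image_dimension := by
  unfold build_image build_image_alt
  have hval : (PySem.Dict.ofList tiles).values = ((PySem.Dict.ofList tiles).items).map Prod.snd := rfl
  have hinv : image_dimension ≤ 1 ∨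
      (((((PySem.Dict.ofList tiles).items.map Prod.snd).length : Int) + 1 - (0 : Nat)) % image_dimension = 0) := by
    unfold Pre_build_image at h
    rcases h with h1 | h0
    · exact Or.inl h1
    · right
      have hsz : ((PySem.Dict.ofList tiles).size : Int) =
          (((PySem.Dict.ofList tiles).items.map Prod.snd).length : Int) := by simp [PySem.Dict.size]
      rw [hsz] at h0
      simpa using h0
  have hmain := pv_loop_eq ((PySem.Dict.ofList tiles).items.map Prod.snd) image_dimension
    ((PySem.Dict.ofList tiles).items.length + 1) 0 ((PySem.Dict.ofList tiles).items)
    top_left_tile [] (by simp) (by simp) hinv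
  rw [hval]
  simpa using hmain

-- ===== VERDICT (by name: the statement is the Claim_ definition above) =====
theorem build_image_spec : Claim_equal_build_image := by
  intro tl tiles dim _ hpre
  exact build_image_eq tl tiles dim hpre
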